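-- pv_equiv track=rewrite | github.com/carnegie/E2P2 | utils/classification/rpsd_stats.py | validate_rxn_to_ec
-- ===== SOURCE A (Python) =====
-- def validate_rxn_to_ec(rxn_to_ec_dict):
--     rxn_with_multiple_ec = set()
--     ec_not_same_first_3 = {}
--     ec_not_same_first_2 = {}
--     ec_not_same_first_1 = {}
--     for rxn in rxn_to_ec_dict:
--         if len(rxn_to_ec_dict[rxn]) > 1:
--             rxn_with_multiple_ec.add(rxn)
--             first_3 = set(['.'.join(ec.split('.')[:3]) for ec in sorted(rxn_to_ec_dict[rxn])])
--             if len(first_3) > 1: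
--                 ec_not_same_first_3.setdefault(rxn, set(rxn_to_ec_dict[rxn]))
--                 first_2 = set(['.'.join(ec.split('.')[:2]) for ec in sorted(rxn_to_ec_dict[rxn])])
--                 if len(first_2) > 1:
--                     ec_not_same_first_2.setdefault(rxn, set(rxn_to_ec_dict[rxn]))
--                     first_1 = set(['.'.join(ec.split('.')[0]) for ec in sorted(rxn_to_ec_dict[rxn])])
--                     if len(first_1) > 1:
--                         ec_not_same_first_1.setdefault(rxn, set(rxn_to_ec_dict[rxn]))
--     for key in ec_not_same_first_1:
--         ec_not_same_first_2.pop(key, None)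
--         ec_not_same_first_3.pop(key, None)
--     for key in ec_not_same_first_2:
--         ec_not_same_first_3.pop(key, None)
--     return rxn_with_multiple_ec, ec_not_same_first_1, ec_not_same_first_2, ec_not_same_first_3
-- ===== SOURCE B (Python) =====
-- def validate_rxn_to_ec(rxn_to_ec_dict):
--     rxn_with_multiple_ec = set()
--     ec_not_same_first_1 = {}
--     ec_not_same_first_2 = {}
--     ec_not_same_first_3 = {}
--     for rxn, ecs in rxn_to_ec_dict.items():
--         if len(ecs) > 1:
--             rxn_with_multiple_ec.add(rxn)
--             splits = [ec.split('.') for ec in ecs]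
--             # place the reaction in exactly ONE dict: the deepest level of disagreement
--             if len({parts[0] for parts in splits}) > 1:
--                 ec_not_same_first_1[rxn] = set(ecs)
--             elif len({'.'.join(parts[:2]) for parts in splits}) > 1:
--                 ec_not_same_first_2[rxn] = set(ecs)
--             elif len({'.'.join(parts[:3]) for parts in splits}) > 1:
--                 ec_not_same_first_3[rxn] = set(ecs)
--     return rxn_with_multiple_ec, ec_not_same_first_1, ec_not_same_first_2, ec_not_same_first_3
-- ===== Notes on version B (the rewrite author's own statement) =====
-- stated objective: simpler
-- what changed: B replaces A's build-three-overlapping-dicts-then-prune pipeline (setdefault into nested dicts plus two final pop loops) by a single pass that splits each EC once and assigns every multi-EC reaction to exactly one output dict via an if/elif chain on the deepest prefix disagreement, dropping the sorting of the EC lists and the pruning loops entirely.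
import Mathlib
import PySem

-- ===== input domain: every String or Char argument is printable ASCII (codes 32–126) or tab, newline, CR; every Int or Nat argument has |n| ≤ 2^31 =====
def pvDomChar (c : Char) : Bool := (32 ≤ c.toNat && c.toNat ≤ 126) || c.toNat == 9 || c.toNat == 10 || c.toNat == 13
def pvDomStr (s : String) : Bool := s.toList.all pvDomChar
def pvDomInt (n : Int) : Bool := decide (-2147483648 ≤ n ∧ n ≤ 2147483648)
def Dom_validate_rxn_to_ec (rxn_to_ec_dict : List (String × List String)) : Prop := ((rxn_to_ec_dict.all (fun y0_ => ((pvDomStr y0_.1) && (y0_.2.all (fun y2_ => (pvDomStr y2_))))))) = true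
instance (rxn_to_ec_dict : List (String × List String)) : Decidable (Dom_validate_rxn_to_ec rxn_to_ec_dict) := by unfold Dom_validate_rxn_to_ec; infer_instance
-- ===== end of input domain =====

-- B replaces A's build-three-dicts-then-prune pipeline by one pass that assigns each
-- multi-EC reaction to exactly one output dict (objective: simpler; return value only).

-- ===== PORT A =====
-- ec.split('.'): the separator '.' is non-empty, so split? always returns some
def pvParts (ec : String) : List String := (PySem.Str.split? ec ".").getD []
-- '.'.join(ec.split('.')[:k]) ; a non-negative list slice [:k] is List.take k
def pvPrefixJoin (k : Nat) (ec : String) : String := PySem.Str.join "." ((pvParts ec).take k)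
-- '.'.join(s) for a str s: joins the characters of s
def pvCharJoin (s : String) : String := PySem.Str.join "." (s.toList.map (fun c => String.ofList [c]))
-- '.'.join(ec.split('.')[0]) ; split() never returns an empty list, so [0] is the head
def pvFirst1A (ec : String) : String := pvCharJoin ((pvParts ec).headD "")

-- loop body of A ('for rxn in rxn_to_ec_dict:'), state = (rxn_with_multiple_ec, ec_not_same_first_3, _2, _1)
def pvStepA (d0 : PySem.Dict String (List String))
    (st : PySem.Set String × PySem.Dict String (List String) × PySem.Dict String (List String) × PySem.Dict String (List String))
    (rxn : String) :
    PySem.Set String × PySem.Dict String (List String) × PySem.Dict String (List String) × PySem.Dict String (List String) :=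
  match st with
  | (mult, d3, d2, d1) =>
    let ecs := d0.getD rxn []   -- rxn is a key of d0, so no KeyError
    if 1 < ecs.length then
      let mult := PySem.Set.add mult rxn
      let first_3 := PySem.Set.ofList ((PySem.List.sorted ecs (fun x => x) false).map (fun ec => pvPrefixJoin 3 ec))
      if 1 < first_3.length then
        let d3 := d3.setdefault rxn (PySem.Set.ofList ecs)
        let first_2 := PySem.Set.ofList ((PySem.List.sorted ecs (fun x => x) false).map (fun ec => pvPrefixJoin 2 ec))
        if 1 < first_2.length then
          let d2 := d2.setdefault rxn (PySem.Set.ofList ecs)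
          let first_1 := PySem.Set.ofList ((PySem.List.sorted ecs (fun x => x) false).map (fun ec => pvFirst1A ec))
          if 1 < first_1.length then (mult, d3, d2, d1.setdefault rxn (PySem.Set.ofList ecs))
          else (mult, d3, d2, d1)
        else (mult, d3, d2, d1)
      else (mult, d3, d2, d1)
    else (mult, d3, d2, d1)

def validate_rxn_to_ec (rxn_to_ec_dict : List (String × List String)) : List String × (List (String × List String)) × (List (String × List String)) × (List (String × List String)) :=
  match (PySem.Dict.mk rxn_to_ec_dict).keys.foldl (pvStepA (PySem.Dict.mk rxn_to_ec_dict))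
      (PySem.Set.empty, PySem.Dict.empty, PySem.Dict.empty, PySem.Dict.empty) with
  | (mult, d3, d2, d1) =>
    -- for key in ec_not_same_first_1: pop from _2 and _3 (pop(key, None) = erase)
    match d1.keys.foldl (fun pq key => (pq.1.erase key, pq.2.erase key)) (d2, d3) with
    | (d2, d3) =>
      -- for key in ec_not_same_first_2: pop from _3
      (mult, d1.items, d2.items, (d2.keys.foldl (fun d key => d.erase key) d3).items)

-- ===== PORT B =====
-- loop body of B; state = (rxn_with_multiple_ec, ec_not_same_first_1, _2, _3).
-- The set-comprehension sizes are order-independent, so iterating the representation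
-- list of the set ecs is exact; under Pre_ keys are distinct, so 'dict[rxn] = v'
-- inserts a fresh key, i.e. appends.  parts[0] is headD: split() never returns [].
def pvStepB
    (st : PySem.Set String × List (String × List String) × List (String × List String) × List (String × List String))
    (p : String × List String) :
    PySem.Set String × List (String × List String) × List (String × List String) × List (String × List String) :=
  match st, p with
  | (mult, n1, n2, n3), (rxn, ecs) =>
    if 1 < ecs.length then
      let mult := PySem.Set.add mult rxn
      let splits := ecs.map (fun ec => pvParts ec)
      if 1 < (PySem.Set.ofList (splits.map (fun parts => parts.headD ""))).length then
        (mult, n1 ++ [(rxn, PySem.Set.ofList ecs)], n2, n3)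
      else if 1 < (PySem.Set.ofList (splits.map (fun parts => PySem.Str.join "." (parts.take 2)))).length then
        (mult, n1, n2 ++ [(rxn, PySem.Set.ofList ecs)], n3)
      else if 1 < (PySem.Set.ofList (splits.map (fun parts => PySem.Str.join "." (parts.take 3)))).length then
        (mult, n1, n2, n3 ++ [(rxn, PySem.Set.ofList ecs)])
      else (mult, n1, n2, n3)
    else (mult, n1, n2, n3)

def validate_rxn_to_ec_alt (rxn_to_ec_dict : List (String × List String)) : List String × (List (String × List String)) × (List (String × List String)) × (List (String × List String)) :=
  match rxn_to_ec_dict.foldl pvStepB (PySem.Set.empty, [], [], []) with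
  | (mult, n1, n2, n3) => (mult, n1, n2, n3)

-- ===== PRECONDITION & SPEC =====
-- Pre_ excludes association lists that do not represent a Python dict of sets
-- (duplicate keys, or duplicate elements inside a value): such inputs cannot be
-- built as a Python dict[str, set[str]], so A never receives them.
def Pre_validate_rxn_to_ec (rxn_to_ec_dict : List (String × List String)) : Prop :=
  (rxn_to_ec_dict.map Prod.fst).Nodup ∧ ∀ p ∈ rxn_to_ec_dict, p.2.Nodup
instance (rxn_to_ec_dict : List (String × List String)) : Decidable (Pre_validate_rxn_to_ec rxn_to_ec_dict) := by unfold Pre_validate_rxn_to_ec; infer_instance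

def pvWitness_validate_rxn_to_ec : (List (String × List String)) :=
  [("RXN-1", ["1.1.1.1", "2.1.1.1"]), ("RXN-2", ["1.1.1.1"])]

def Spec_validate_rxn_to_ec (rxn_to_ec_dict : List (String × List String)) (out : List String × (List (String × List String)) × (List (String × List String)) × (List (String × List String))) : Prop := out = validate_rxn_to_ec_alt rxn_to_ec_dict
instance (rxn_to_ec_dict : List (String × List String)) (out : List String × (List (String × List String)) × (List (String × List String)) × (List (String × List String))) : Decidable (Spec_validate_rxn_to_ec rxn_to_ec_dict out) := by unfold Spec_validate_rxn_to_ec; infer_instance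

-- ===== CLAIM (what is proved, stated in full; the proofs are below) =====
def Claim_equal_validate_rxn_to_ec : Prop := ∀ (rxn_to_ec_dict : List (String × List String)), Dom_validate_rxn_to_ec rxn_to_ec_dict → Pre_validate_rxn_to_ec rxn_to_ec_dict → Spec_validate_rxn_to_ec rxn_to_ec_dict (validate_rxn_to_ec rxn_to_ec_dict)

-- ===== LEMMAS AND PROOFS =====

-- ---------- string layer: ec.split('.') and '.'-joins ----------

-- structural version of splitting a character list at '.'
def pvSplit1 : List Char → List (List Char)
  | [] => [[]]
  | c :: t =>
    if c = '.' then [] :: pvSplit1 t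
    else
      match pvSplit1 t with
      | [] => [[c]]
      | p :: ps => (c :: p) :: ps

theorem pvSplit1_ne_nil (cs : List Char) : pvSplit1 cs ≠ [] := by
  induction cs with
  | nil => simp [pvSplit1]
  | cons c t ih =>
    simp only [pvSplit1]
    split_ifs
    · simp
    · cases h : pvSplit1 t <;> simp

theorem pvSplit1_dotfree (cs : List Char) : ∀ p ∈ pvSplit1 cs, ('.' : Char) ∉ p := by
  induction cs with
  | nil => simp [pvSplit1]
  | cons c t ih =>
    intro p hp
    by_cases hc : c = '.'
    · rw [show pvSplit1 (c :: t) = [] :: pvSplit1 t from by simp [pvSplit1, hc]] at hp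
      rcases List.mem_cons.mp hp with h | h
      · simp [h]
      · exact ih p h
    · rcases hq : pvSplit1 t with _ | ⟨q, qs⟩
      · exact absurd hq (pvSplit1_ne_nil t)
      · rw [show pvSplit1 (c :: t) = (c :: q) :: qs from by simp [pvSplit1, hc, hq]] at hp
        rcases List.mem_cons.mp hp with h | h
        · subst h
          intro hdot
          rcases List.mem_cons.mp hdot with hd | hd
          · exact hc hd.symm
          · exact ih q (by simp [hq]) hd
        · exact ih p (by simp [hq, h])

theorem pvGoSpec (cs : List Char) : ∀ (fuel : Nat) (cur : List Char) (acc : List (List Char)),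
    cs.length < fuel →
    PySem.Chars.splitOn.go ['.'] fuel cs cur acc =
      acc.reverse ++ (match pvSplit1 cs with
        | [] => []
        | p :: ps => (cur.reverse ++ p) :: ps) := by
  induction cs with
  | nil =>
    intro fuel cur acc hf
    cases fuel with
    | zero => omega
    | succ f => simp [PySem.Chars.splitOn.go, pvSplit1]
  | cons c t ih =>
    intro fuel cur acc hf
    cases fuel with
    | zero => omega
    | succ f =>
      by_cases hc : c = '.'
      · subst hc
        rw [show PySem.Chars.splitOn.go ['.'] (f+1) ('.' :: t) cur acc
              = PySem.Chars.splitOn.go ['.'] f t [] (cur.reverse :: acc) from by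
            simp [PySem.Chars.splitOn.go, List.isPrefixOf]]
        rw [ih f [] (cur.reverse :: acc) (by simpa using hf)]
        cases h : pvSplit1 t with
        | nil => exact absurd h (pvSplit1_ne_nil t)
        | cons p ps => simp [pvSplit1, h]
      · rw [show PySem.Chars.splitOn.go ['.'] (f+1) (c :: t) cur acc
              = PySem.Chars.splitOn.go ['.'] f t (c :: cur) acc from by
            simp [PySem.Chars.splitOn.go, List.isPrefixOf, hc, Ne.symm hc]]
        rw [ih f (c :: cur) acc (by simpa using hf)]
        cases h : pvSplit1 t with
        | nil => exact absurd h (pvSplit1_ne_nil t)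
        | cons p ps => simp [pvSplit1, hc, h]

theorem pvSplitOn_eq (cs : List Char) : PySem.Chars.splitOn cs ['.'] = pvSplit1 cs := by
  rw [PySem.Chars.splitOn, pvGoSpec cs (cs.length + 1) [] [] (by omega)]
  cases h : pvSplit1 cs with
  | nil => exact absurd h (pvSplit1_ne_nil cs)
  | cons p ps => simp

theorem pvParts_toList (ec : String) :
    (pvParts ec).map String.toList = PySem.Chars.splitOn ec.toList ['.'] := by
  have hsep : (".".toList) = ['.'] := by decide
  simp [pvParts, PySem.Str.split?, PySem.Chars.split?, hsep, List.map_map,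
        Function.comp_def]

theorem pvParts_dotfree (ec : String) :
    ∀ p ∈ (pvParts ec).map String.toList, ('.' : Char) ∉ p := by
  rw [pvParts_toList, pvSplitOn_eq]; exact pvSplit1_dotfree _

-- truncation of a character list at its k-th '.'
def pvTrunc : Nat → List Char → List Char
  | _, [] => []
  | k, c :: t => if c = '.' then (if k ≤ 1 then [] else '.' :: pvTrunc (k-1) t) else c :: pvTrunc k t

theorem pvTrunc_append (k : Nat) (p xs : List Char) (hp : ('.' : Char) ∉ p) :
    pvTrunc k (p ++ xs) = p ++ pvTrunc k xs := by
  induction p with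
  | nil => simp
  | cons c q ih =>
    have hc : c ≠ '.' := fun h => hp (by simp [h])
    simp only [List.cons_append, pvTrunc, if_neg hc]
    rw [ih (fun h => hp (by simp [h]))]

theorem pvTrunc_dotfree (k : Nat) (p : List Char) (hp : ('.' : Char) ∉ p) :
    pvTrunc k p = p := by
  have h0 : pvTrunc k [] = [] := by cases k <;> rfl
  simpa [h0] using pvTrunc_append k p [] hp

theorem pvTrunc_join (k : Nat) (hk : 1 ≤ k) (P : List (List Char))
    (hP : ∀ p ∈ P, ('.' : Char) ∉ p) :
    pvTrunc k (PySem.Chars.join ['.'] P) = PySem.Chars.join ['.'] (P.take k) := by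
  induction P generalizing k with
  | nil => simp [PySem.Chars.join_nil, pvTrunc]
  | cons p P' ih =>
    cases P' with
    | nil =>
      have ht : (List.take k [p] : List (List Char)) = [p] := by
        cases k with
        | zero => omega
        | succ n => simp
      rw [PySem.Chars.join_singleton, ht, PySem.Chars.join_singleton]
      exact pvTrunc_dotfree k p (hP p (by simp))
    | cons q R =>
      rw [PySem.Chars.join_cons_cons]
      have hp : ('.' : Char) ∉ p := hP p (by simp)
      rw [List.append_assoc, pvTrunc_append k p _ hp]
      simp only [List.singleton_append, pvTrunc, if_pos rfl]
      by_cases hk1 : k ≤ 1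
      · have hk' : k = 1 := by omega
        subst hk'
        simp [PySem.Chars.join_singleton]
      · rw [if_neg hk1]
        have hk2 : 1 ≤ k - 1 := by omega
        rw [ih (k-1) hk2 (fun r hr => hP r (by simp [hr]))]
        have hkk : k = (k - 1) + 1 := by omega
        rw [hkk, List.take_succ_cons]
        have : ∃ s S, (q :: R).take (k-1) = s :: S := by
          cases hkm : k - 1 with
          | zero => omega
          | succ m => exact ⟨q, R.take m, by simp⟩
        rcases this with ⟨s, S, hsS⟩
        rw [hsS, PySem.Chars.join_cons_cons]
        simp [hsS]

theorem pvPrefixJoin_toList (k : Nat) (ec : String) :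
    (pvPrefixJoin k ec).toList
      = PySem.Chars.join ['.'] (((pvParts ec).map String.toList).take k) := by
  have hsep : (".".toList) = ['.'] := by decide
  simp [pvPrefixJoin, PySem.Str.toList_join, hsep, List.map_take]

-- a deeper prefix-join determines a shallower one
theorem pvPrefixJoin_mono (k : Nat) (hk : 1 ≤ k) (a b : String)
    (h : pvPrefixJoin (k+1) a = pvPrefixJoin (k+1) b) :
    pvPrefixJoin k a = pvPrefixJoin k b := by
  apply String.toList_inj.mp
  have h' := congrArg String.toList h
  rw [pvPrefixJoin_toList, pvPrefixJoin_toList] at h'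
  have ha := pvTrunc_join k hk (((pvParts a).map String.toList).take (k+1))
    (fun p hp => pvParts_dotfree a p (List.mem_of_mem_take hp))
  have hb := pvTrunc_join k hk (((pvParts b).map String.toList).take (k+1))
    (fun p hp => pvParts_dotfree b p (List.mem_of_mem_take hp))
  rw [pvPrefixJoin_toList, pvPrefixJoin_toList]
  calc PySem.Chars.join ['.'] (((pvParts a).map String.toList).take k)
      = PySem.Chars.join ['.'] ((((pvParts a).map String.toList).take (k+1)).take k) := by
        rw [List.take_take, show min k (k+1) = k from by omega]
    _ = pvTrunc k (PySem.Chars.join ['.'] (((pvParts a).map String.toList).take (k+1))) := ha.symm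
    _ = pvTrunc k (PySem.Chars.join ['.'] (((pvParts b).map String.toList).take (k+1))) := by rw [h']
    _ = PySem.Chars.join ['.'] ((((pvParts b).map String.toList).take (k+1)).take k) := hb
    _ = PySem.Chars.join ['.'] (((pvParts b).map String.toList).take k) := by
        rw [List.take_take, show min k (k+1) = k from by omega]

def pvG1 (ec : String) : String := (pvParts ec).headD ""

theorem pvG1_eq_prefixJoin_one (ec : String) : pvG1 ec = pvPrefixJoin 1 ec := by
  apply String.toList_inj.mp
  rw [pvPrefixJoin_toList]
  cases h : pvParts ec with
  | nil => simp [pvG1, h, PySem.Chars.join_nil]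
  | cons p ps => simp [pvG1, h, PySem.Chars.join_singleton]

-- '.'.join(s) over the characters of s is injective
theorem pvCharJoin_toList (s : String) :
    (pvCharJoin s).toList = PySem.Chars.join ['.'] (s.toList.map (fun c => [c])) := by
  have hsep : (".".toList) = ['.'] := by decide
  simp [pvCharJoin, PySem.Str.toList_join, hsep, List.map_map, Function.comp_def]

theorem pvCJ_inj (s : List Char) : ∀ t : List Char,
    PySem.Chars.join ['.'] (s.map (fun c => [c])) = PySem.Chars.join ['.'] (t.map (fun c => [c])) →
    s = t := by
  induction s with
  | nil =>
    intro t h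
    cases t with
    | nil => rfl
    | cons d v =>
      exfalso
      cases v with
      | nil => simp [PySem.Chars.join_nil, PySem.Chars.join_singleton] at h
      | cons e w =>
        rw [List.map_cons, List.map_cons, PySem.Chars.join_cons_cons] at h
        simp [PySem.Chars.join_nil] at h
  | cons c u ih =>
    intro t h
    cases t with
    | nil =>
      exfalso
      cases u with
      | nil => simp [PySem.Chars.join_nil, PySem.Chars.join_singleton] at h
      | cons e w =>
        rw [List.map_cons, List.map_cons, PySem.Chars.join_cons_cons] at h
        simp [PySem.Chars.join_nil] at h
    | cons d v =>
      cases u with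
      | nil =>
        cases v with
        | nil =>
          rw [List.map_singleton, List.map_singleton, PySem.Chars.join_singleton,
              PySem.Chars.join_singleton] at h
          simpa using h
        | cons f x =>
          exfalso
          simp only [List.map_cons, List.map_nil] at h
          rw [PySem.Chars.join_singleton, PySem.Chars.join_cons_cons] at h
          have := congrArg List.length h
          simp at this
      | cons e w =>
        cases v with
        | nil =>
          exfalso
          simp only [List.map_cons, List.map_nil] at h
          rw [PySem.Chars.join_singleton, PySem.Chars.join_cons_cons] at h
          have := congrArg List.length h
          simp at this
        | cons f x =>
          simp only [List.map_cons] at h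
          rw [PySem.Chars.join_cons_cons, PySem.Chars.join_cons_cons] at h
          simp only [List.cons_append, List.nil_append, List.singleton_append,
                     List.cons.injEq] at h
          obtain ⟨hcd, h2⟩ := h
          obtain ⟨-, htail⟩ := h2
          have := ih (f :: x) (by simp only [List.map_cons]; exact htail)
          rw [hcd, this]

theorem pvCharJoin_inj (s t : String) (h : pvCharJoin s = pvCharJoin t) : s = t := by
  apply String.toList_inj.mp
  have h' := congrArg String.toList h
  rw [pvCharJoin_toList, pvCharJoin_toList] at h'
  exact pvCJ_inj s.toList t.toList h'

-- ---------- cardinality layer ----------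

theorem pvNodup_one_lt (s : List String) (hs : s.Nodup) :
    1 < s.length ↔ ∃ x ∈ s, ∃ y ∈ s, x ≠ y := by
  match s with
  | [] => simp
  | [a] => simp
  | a :: b :: t =>
    constructor
    · intro _
      refine ⟨a, by simp, b, by simp, ?_⟩
      intro hab
      have : a ∉ (b :: t) := (List.nodup_cons.mp hs).1
      exact this (by simp [hab])
    · intro _
      simp

theorem pvCard (l : List String) (f : String → String) :
    1 < (PySem.Set.ofList (l.map f)).length ↔ ∃ a ∈ l, ∃ b ∈ l, f a ≠ f b := by
  rw [pvNodup_one_lt _ (PySem.Set.nodup_ofList _)]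
  constructor
  · rintro ⟨x, hx, y, hy, hxy⟩
    rw [PySem.Set.mem_ofList] at hx hy
    obtain ⟨a, ha, rfl⟩ := List.mem_map.mp hx
    obtain ⟨b, hb, rfl⟩ := List.mem_map.mp hy
    exact ⟨a, ha, b, hb, hxy⟩
  · rintro ⟨a, ha, b, hb, hab⟩
    exact ⟨f a, by rw [PySem.Set.mem_ofList]; exact List.mem_map_of_mem ha,
           f b, by rw [PySem.Set.mem_ofList]; exact List.mem_map_of_mem hb, hab⟩

-- semantic conditions
abbrev pvC1 (ecs : List String) : Prop := ∃ a ∈ ecs, ∃ b ∈ ecs, pvG1 a ≠ pvG1 b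
abbrev pvC2 (ecs : List String) : Prop := ∃ a ∈ ecs, ∃ b ∈ ecs, pvPrefixJoin 2 a ≠ pvPrefixJoin 2 b
abbrev pvC3 (ecs : List String) : Prop := ∃ a ∈ ecs, ∃ b ∈ ecs, pvPrefixJoin 3 a ≠ pvPrefixJoin 3 b

theorem pvC1_imp_C2 (ecs : List String) (h : pvC1 ecs) : pvC2 ecs := by
  obtain ⟨a, ha, b, hb, hab⟩ := h
  refine ⟨a, ha, b, hb, fun hj => hab ?_⟩
  rw [pvG1_eq_prefixJoin_one, pvG1_eq_prefixJoin_one]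
  exact pvPrefixJoin_mono 1 (by omega) a b hj

theorem pvC2_imp_C3 (ecs : List String) (h : pvC2 ecs) : pvC3 ecs := by
  obtain ⟨a, ha, b, hb, hab⟩ := h
  exact ⟨a, ha, b, hb, fun hj => hab (pvPrefixJoin_mono 2 (by omega) a b hj)⟩

-- Bool conditions of the two ports
def pvAM (ecs : List String) : Bool := decide (1 < ecs.length)
def pvA3 (ecs : List String) : Bool :=
  decide (1 < (PySem.Set.ofList ((PySem.List.sorted ecs (fun x => x) false).map (fun ec => pvPrefixJoin 3 ec))).length)
def pvA2 (ecs : List String) : Bool :=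
  decide (1 < (PySem.Set.ofList ((PySem.List.sorted ecs (fun x => x) false).map (fun ec => pvPrefixJoin 2 ec))).length)
def pvA1 (ecs : List String) : Bool :=
  decide (1 < (PySem.Set.ofList ((PySem.List.sorted ecs (fun x => x) false).map (fun ec => pvFirst1A ec))).length)
def pvB1 (ecs : List String) : Bool :=
  decide (1 < (PySem.Set.ofList ((ecs.map (fun ec => pvParts ec)).map (fun parts => parts.headD ""))).length)
def pvB2 (ecs : List String) : Bool :=
  decide (1 < (PySem.Set.ofList ((ecs.map (fun ec => pvParts ec)).map (fun parts => PySem.Str.join "." (parts.take 2)))).length)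
def pvB3 (ecs : List String) : Bool :=
  decide (1 < (PySem.Set.ofList ((ecs.map (fun ec => pvParts ec)).map (fun parts => PySem.Str.join "." (parts.take 3)))).length)

theorem pvA3_iff (ecs : List String) : pvA3 ecs = true ↔ pvC3 ecs := by
  rw [pvA3, decide_eq_true_iff, pvCard]
  constructor <;> rintro ⟨a, ha, b, hb, hab⟩ <;>
    exact ⟨a, by simpa [PySem.List.mem_sorted] using ha,
           b, by simpa [PySem.List.mem_sorted] using hb, hab⟩

theorem pvA2_iff (ecs : List String) : pvA2 ecs = true ↔ pvC2 ecs := by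
  rw [pvA2, decide_eq_true_iff, pvCard]
  constructor <;> rintro ⟨a, ha, b, hb, hab⟩ <;>
    exact ⟨a, by simpa [PySem.List.mem_sorted] using ha,
           b, by simpa [PySem.List.mem_sorted] using hb, hab⟩

theorem pvA1_iff (ecs : List String) : pvA1 ecs = true ↔ pvC1 ecs := by
  rw [pvA1, decide_eq_true_iff, pvCard]
  constructor <;> rintro ⟨a, ha, b, hb, hab⟩
  · refine ⟨a, by simpa [PySem.List.mem_sorted] using ha,
            b, by simpa [PySem.List.mem_sorted] using hb, fun hg => hab ?_⟩
    simp only [pvFirst1A]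
    rw [show (pvParts a).headD "" = pvG1 a from rfl, show (pvParts b).headD "" = pvG1 b from rfl, hg]
  · refine ⟨a, by simpa [PySem.List.mem_sorted] using ha,
            b, by simpa [PySem.List.mem_sorted] using hb, fun hj => hab ?_⟩
    exact pvCharJoin_inj _ _ hj

theorem pvB1_iff (ecs : List String) : pvB1 ecs = true ↔ pvC1 ecs := by
  rw [pvB1, decide_eq_true_iff, List.map_map, pvCard]
  rfl

theorem pvB2_iff (ecs : List String) : pvB2 ecs = true ↔ pvC2 ecs := by
  rw [pvB2, decide_eq_true_iff, List.map_map, pvCard]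
  rfl

theorem pvB3_iff (ecs : List String) : pvB3 ecs = true ↔ pvC3 ecs := by
  rw [pvB3, decide_eq_true_iff, List.map_map, pvCard]
  rfl

-- Bool conditions as decides of the semantic conditions
theorem pvA1_eq (ecs : List String) : pvA1 ecs = decide (pvC1 ecs) := by
  by_cases h : pvC1 ecs
  · simp [h, (pvA1_iff ecs).mpr h]
  · simp only [h, decide_false]
    exact (Bool.not_eq_true _).mp (fun hh => h ((pvA1_iff ecs).mp hh))

theorem pvA2_eq (ecs : List String) : pvA2 ecs = decide (pvC2 ecs) := by
  by_cases h : pvC2 ecs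
  · simp [h, (pvA2_iff ecs).mpr h]
  · simp only [h, decide_false]
    exact (Bool.not_eq_true _).mp (fun hh => h ((pvA2_iff ecs).mp hh))

theorem pvA3_eq (ecs : List String) : pvA3 ecs = decide (pvC3 ecs) := by
  by_cases h : pvC3 ecs
  · simp [h, (pvA3_iff ecs).mpr h]
  · simp only [h, decide_false]
    exact (Bool.not_eq_true _).mp (fun hh => h ((pvA3_iff ecs).mp hh))

theorem pvB1_eq (ecs : List String) : pvB1 ecs = decide (pvC1 ecs) := by
  by_cases h : pvC1 ecs
  · simp [h, (pvB1_iff ecs).mpr h]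
  · simp only [h, decide_false]
    exact (Bool.not_eq_true _).mp (fun hh => h ((pvB1_iff ecs).mp hh))

theorem pvB2_eq (ecs : List String) : pvB2 ecs = decide (pvC2 ecs) := by
  by_cases h : pvC2 ecs
  · simp [h, (pvB2_iff ecs).mpr h]
  · simp only [h, decide_false]
    exact (Bool.not_eq_true _).mp (fun hh => h ((pvB2_iff ecs).mp hh))

theorem pvB3_eq (ecs : List String) : pvB3 ecs = decide (pvC3 ecs) := by
  by_cases h : pvC3 ecs
  · simp [h, (pvB3_iff ecs).mpr h]
  · simp only [h, decide_false]
    exact (Bool.not_eq_true _).mp (fun hh => h ((pvB3_iff ecs).mp hh))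

-- ---------- fold layer ----------

def pvRow (p : String × List String) : String × List String := (p.1, PySem.Set.ofList p.2)

theorem pvContains_mk_false (d : List (String × List String)) (k : String)
    (h : k ∉ d.map Prod.fst) : (PySem.Dict.mk d).contains k = false := by
  simp only [PySem.Dict.contains, List.any_eq_false]
  intro p hp he
  exact h ((eq_of_beq he) ▸ List.mem_map_of_mem hp)

theorem pvSetdefault_fresh (d : List (String × List String)) (k : String) (v : List String)
    (h : k ∉ d.map Prod.fst) :
    (PySem.Dict.mk d).setdefault k v = PySem.Dict.mk (d ++ [(k, v)]) := by
  simp [PySem.Dict.setdefault, pvContains_mk_false d k h]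

theorem pvSetAdd_fresh (s : List String) (k : String) (h : k ∉ s) :
    PySem.Set.add s k = s ++ [k] := by
  simp only [PySem.Set.add, PySem.Set.contains]
  rw [if_neg]
  simp [h]

-- closed form of A's main loop
theorem pvLoopA (l : List (String × List String)) :
    ∀ (d0 : PySem.Dict String (List String)) (mult : List String)
      (d3 d2 d1 : List (String × List String)),
    (∀ p ∈ l, d0.getD p.1 [] = p.2) →
    (∀ p ∈ l, p.1 ∉ mult ∧ p.1 ∉ d3.map Prod.fst ∧ p.1 ∉ d2.map Prod.fst ∧ p.1 ∉ d1.map Prod.fst) →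
    (l.map Prod.fst).Nodup →
    (l.map Prod.fst).foldl (pvStepA d0) (mult, PySem.Dict.mk d3, PySem.Dict.mk d2, PySem.Dict.mk d1)
      = (mult ++ (l.filter (fun p => pvAM p.2)).map Prod.fst,
         PySem.Dict.mk (d3 ++ (l.filter (fun p => pvAM p.2 && pvA3 p.2)).map pvRow),
         PySem.Dict.mk (d2 ++ (l.filter (fun p => pvAM p.2 && pvA3 p.2 && pvA2 p.2)).map pvRow),
         PySem.Dict.mk (d1 ++ (l.filter (fun p => pvAM p.2 && pvA3 p.2 && pvA2 p.2 && pvA1 p.2)).map pvRow)) := by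
  induction l with
  | nil => intro d0 mult d3 d2 d1 _ _ _; simp
  | cons hd tl ih =>
    intro d0 mult d3 d2 d1 h0 hfresh hnd
    obtain ⟨k, v⟩ := hd
    have hv : d0.getD k [] = v := h0 (k, v) (by simp)
    have hk := hfresh (k, v) (by simp)
    have hnd' : (k :: tl.map Prod.fst).Nodup := by simpa using hnd
    have hknd : k ∉ tl.map Prod.fst := (List.nodup_cons.mp hnd').1
    have hndtl : (tl.map Prod.fst).Nodup := (List.nodup_cons.mp hnd').2
    have h0tl : ∀ p ∈ tl, d0.getD p.1 [] = p.2 := fun p hp => h0 p (by simp [hp])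
    simp only [List.map_cons, List.foldl_cons]
    rw [show pvStepA d0 (mult, PySem.Dict.mk d3, PySem.Dict.mk d2, PySem.Dict.mk d1) k
          = (if pvAM v then
               (PySem.Set.add mult k,
                if pvA3 v then (PySem.Dict.mk d3).setdefault k (PySem.Set.ofList v) else PySem.Dict.mk d3,
                if pvA3 v && pvA2 v then (PySem.Dict.mk d2).setdefault k (PySem.Set.ofList v) else PySem.Dict.mk d2,
                if pvA3 v && pvA2 v && pvA1 v then (PySem.Dict.mk d1).setdefault k (PySem.Set.ofList v) else PySem.Dict.mk d1)
             else (mult, PySem.Dict.mk d3, PySem.Dict.mk d2, PySem.Dict.mk d1)) from by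
      simp only [pvStepA, hv, pvAM, pvA3, pvA2, pvA1]
      by_cases hm : 1 < v.length
      · simp only [hm, if_pos, decide_true, if_true]
        by_cases h3 : 1 < (PySem.Set.ofList ((PySem.List.sorted v (fun x => x) false).map (fun ec => pvPrefixJoin 3 ec))).length
        · simp only [h3, decide_true, if_true, Bool.true_and]
          by_cases h2' : 1 < (PySem.Set.ofList ((PySem.List.sorted v (fun x => x) false).map (fun ec => pvPrefixJoin 2 ec))).length
          · simp only [h2', decide_true, if_true, Bool.true_and]
            by_cases h1' : 1 < (PySem.Set.ofList ((PySem.List.sorted v (fun x => x) false).map (fun ec => pvFirst1A ec))).length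
            · simp [h1', h2', h3]
            · simp [h1', h2', h3]
          · simp [h2', h3]
        · simp [h3]
      · simp [hm]]
    by_cases hm : pvAM v
    · rw [if_pos hm]
      rw [pvSetAdd_fresh mult k hk.1]
      by_cases h3 : pvA3 v
      · rw [if_pos h3, pvSetdefault_fresh d3 k _ hk.2.1]
        by_cases h2' : pvA2 v
        · rw [if_pos (by simp [h3, h2']), pvSetdefault_fresh d2 k _ hk.2.2.1]
          by_cases h1' : pvA1 v
          · rw [if_pos (by simp [h3, h2', h1']), pvSetdefault_fresh d1 k _ hk.2.2.2]
            rw [ih d0 (mult ++ [k]) (d3 ++ [(k, PySem.Set.ofList v)]) (d2 ++ [(k, PySem.Set.ofList v)]) (d1 ++ [(k, PySem.Set.ofList v)]) h0tl ?_ hndtl]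
            · simp [hm, h3, h2', h1', pvRow]
            · intro p hp
              have hne : p.1 ≠ k := fun he => hknd (he ▸ List.mem_map_of_mem hp)
              have := hfresh p (by simp [hp])
              simp [this.1, this.2.1, this.2.2.1, this.2.2.2, hne]
          · rw [if_neg (by simp [h1'])]
            rw [ih d0 (mult ++ [k]) (d3 ++ [(k, PySem.Set.ofList v)]) (d2 ++ [(k, PySem.Set.ofList v)]) d1 h0tl ?_ hndtl]
            · simp [hm, h3, h2', h1', pvRow]
            · intro p hp
              have hne : p.1 ≠ k := fun he => hknd (he ▸ List.mem_map_of_mem hp)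
              have := hfresh p (by simp [hp])
              simp [this.1, this.2.1, this.2.2.1, this.2.2.2, hne]
        · rw [if_neg (by simp [h2']), if_neg (by simp [h2'])]
          rw [ih d0 (mult ++ [k]) (d3 ++ [(k, PySem.Set.ofList v)]) d2 d1 h0tl ?_ hndtl]
          · simp [hm, h3, h2', pvRow]
          · intro p hp
            have hne : p.1 ≠ k := fun he => hknd (he ▸ List.mem_map_of_mem hp)
            have := hfresh p (by simp [hp])
            simp [this.1, this.2.1, this.2.2.1, this.2.2.2, hne]
      · rw [if_neg h3, if_neg (by simp [h3]), if_neg (by simp [h3])]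
        rw [ih d0 (mult ++ [k]) d3 d2 d1 h0tl ?_ hndtl]
        · simp [hm, h3]
        · intro p hp
          have hne : p.1 ≠ k := fun he => hknd (he ▸ List.mem_map_of_mem hp)
          have := hfresh p (by simp [hp])
          simp [this.1, this.2.1, this.2.2.1, this.2.2.2, hne]
    · rw [if_neg hm]
      rw [ih d0 mult d3 d2 d1 h0tl (fun p hp => hfresh p (by simp [hp])) hndtl]
      simp [hm]

-- closed form of B's loop
theorem pvLoopB (l : List (String × List String)) :
    ∀ (mult : List String) (n1 n2 n3 : List (String × List String)),
    (∀ p ∈ l, p.1 ∉ mult) →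
    (l.map Prod.fst).Nodup →
    l.foldl pvStepB (mult, n1, n2, n3)
      = (mult ++ (l.filter (fun p => pvAM p.2)).map Prod.fst,
         n1 ++ (l.filter (fun p => pvAM p.2 && pvB1 p.2)).map pvRow,
         n2 ++ (l.filter (fun p => pvAM p.2 && !pvB1 p.2 && pvB2 p.2)).map pvRow,
         n3 ++ (l.filter (fun p => pvAM p.2 && !pvB1 p.2 && !pvB2 p.2 && pvB3 p.2)).map pvRow) := by
  induction l with
  | nil => intro mult n1 n2 n3 _ _; simp
  | cons hd tl ih =>
    intro mult n1 n2 n3 hfresh hnd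
    obtain ⟨k, v⟩ := hd
    have hk : k ∉ mult := hfresh (k, v) (by simp)
    have hnd' : (k :: tl.map Prod.fst).Nodup := by simpa using hnd
    have hknd : k ∉ tl.map Prod.fst := (List.nodup_cons.mp hnd').1
    have hndtl : (tl.map Prod.fst).Nodup := (List.nodup_cons.mp hnd').2
    have hfreshtl : ∀ p ∈ tl, p.1 ∉ mult ++ [k] := by
      intro p hp
      have hne : p.1 ≠ k := fun he => hknd (he ▸ List.mem_map_of_mem hp)
      simp [hfresh p (by simp [hp]), hne]
    simp only [List.foldl_cons, pvStepB]
    by_cases hm : 1 < v.length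
    · have hAM : pvAM v = true := by simp [pvAM, hm]
      rw [if_pos hm, pvSetAdd_fresh mult k hk]
      by_cases h1' : 1 < (PySem.Set.ofList ((v.map (fun ec => pvParts ec)).map (fun parts => parts.headD ""))).length
      · have hb1 : pvB1 v = true := by unfold pvB1; exact decide_eq_true h1'
        rw [if_pos h1', ih (mult ++ [k]) _ n2 n3 hfreshtl hndtl]
        simp [hAM, hb1, pvRow]
      · have hb1 : pvB1 v = false := by unfold pvB1; exact decide_eq_false h1'
        rw [if_neg h1']
        by_cases h2' : 1 < (PySem.Set.ofList ((v.map (fun ec => pvParts ec)).map (fun parts => PySem.Str.join "." (parts.take 2)))).length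
        · have hb2 : pvB2 v = true := by unfold pvB2; exact decide_eq_true h2'
          rw [if_pos h2', ih (mult ++ [k]) n1 _ n3 hfreshtl hndtl]
          simp [hAM, hb1, hb2, pvRow]
        · have hb2 : pvB2 v = false := by unfold pvB2; exact decide_eq_false h2'
          rw [if_neg h2']
          by_cases h3' : 1 < (PySem.Set.ofList ((v.map (fun ec => pvParts ec)).map (fun parts => PySem.Str.join "." (parts.take 3)))).length
          · have hb3 : pvB3 v = true := by unfold pvB3; exact decide_eq_true h3'
            rw [if_pos h3', ih (mult ++ [k]) n1 n2 _ hfreshtl hndtl]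
            simp [hAM, hb1, hb2, hb3, pvRow]
          · have hb3 : pvB3 v = false := by unfold pvB3; exact decide_eq_false h3'
            rw [if_neg h3', ih (mult ++ [k]) n1 n2 n3 hfreshtl hndtl]
            simp [hAM, hb1, hb2, hb3]
    · have hAM : pvAM v = false := by simp [pvAM]; omega
      rw [if_neg hm, ih mult n1 n2 n3 (fun p hp => hfresh p (by simp [hp])) hndtl]
      simp [hAM]

-- erase folds are filters
theorem pvEraseFold (K : List String) :
    ∀ (d : List (String × List String)),
    K.foldl (fun d k => PySem.Dict.erase d k) (PySem.Dict.mk d)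
      = PySem.Dict.mk (d.filter (fun p => !K.contains p.1)) := by
  induction K with
  | nil => intro d; simp
  | cons k K' ih =>
    intro d
    simp only [List.foldl_cons]
    rw [show (PySem.Dict.mk d).erase k = PySem.Dict.mk (d.filter (fun p => !(p.1 == k))) from rfl]
    rw [ih]
    congr 1
    rw [List.filter_filter]
    apply List.filter_congr
    intro p _
    simp only [List.contains_cons]
    cases h1 : (p.1 == k) <;> cases h2 : K'.contains p.1 <;> simp [h1, h2]

theorem pvEraseFoldPair (K : List String) :
    ∀ (d2 d3 : PySem.Dict String (List String)),
    K.foldl (fun pq k => (pq.1.erase k, pq.2.erase k)) (d2, d3)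
      = (K.foldl (fun d k => d.erase k) d2, K.foldl (fun d k => d.erase k) d3) := by
  induction K with
  | nil => intro d2 d3; rfl
  | cons k K' ih => intro d2 d3; simp only [List.foldl_cons]; rw [ih]

-- keys are injective under Nodup
theorem pvKeyInj (l : List (String × List String)) (hn : (l.map Prod.fst).Nodup)
    (p q : String × List String) (hp : p ∈ l) (hq : q ∈ l) (h1 : p.1 = q.1) : p = q := by
  induction l with
  | nil => cases hp
  | cons hd tl ih =>
    have hn' : (hd :: tl).map Prod.fst = hd.1 :: tl.map Prod.fst := by simp
    rw [hn'] at hn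
    have hnd := List.nodup_cons.mp hn
    rcases List.mem_cons.mp hp with hp' | hp' <;> rcases List.mem_cons.mp hq with hq' | hq'
    · rw [hp', hq']
    · exfalso
      apply hnd.1
      rw [← hp', h1]
      exact List.mem_map_of_mem hq'
    · exfalso
      apply hnd.1
      rw [← hq', ← h1]
      exact List.mem_map_of_mem hp'
    · exact ih hnd.2 hp' hq'

theorem pvMemFilterKeys (l : List (String × List String)) (hn : (l.map Prod.fst).Nodup)
    (c : (String × List String) → Bool) (q : String × List String) (hq : q ∈ l) :
    ((l.filter c).map Prod.fst).contains q.1 = c q := by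
  cases hcq : c q
  · have hnm : q.1 ∉ (l.filter c).map Prod.fst := by
      intro hmem
      obtain ⟨r, hr, hre⟩ := List.mem_map.mp hmem
      have hrl := List.mem_of_mem_filter hr
      have hcr := List.of_mem_filter hr
      rw [pvKeyInj l hn r q hrl hq hre] at hcr
      rw [hcr] at hcq
      cases hcq
    exact (Bool.not_eq_true _).mp (fun hc => hnm (List.mem_of_elem_eq_true hc))
  · exact List.elem_eq_true_of_mem
      (List.mem_map_of_mem (List.mem_filter.mpr ⟨hq, hcq⟩))

-- ===== VERDICT (by name: the statement is the Claim_ definition above) =====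
theorem validate_rxn_to_ec_spec : Claim_equal_validate_rxn_to_ec := by
  intro l _ hpre
  unfold Spec_validate_rxn_to_ec
  obtain ⟨hnd, hvals⟩ := hpre
  have hkeys : (PySem.Dict.mk l).keys = l.map Prod.fst := PySem.Dict.keys_mk l
  have h0 : ∀ p ∈ l, (PySem.Dict.mk l).getD p.1 [] = p.2 := by
    intro p hp
    exact PySem.Dict.getD_of_mem_items (PySem.Dict.mk l)
      (show (p.1, p.2) ∈ (PySem.Dict.mk l).items from by simpa using hp)
      (by rw [hkeys]; exact hnd) []
  have hA := pvLoopA l (PySem.Dict.mk l) [] [] [] [] h0 (by intro p hp; simp) hnd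
  have hB := pvLoopB l [] [] [] [] (by intro p hp; simp) hnd
  simp only [List.nil_append] at hA hB
  set c1A : (String × List String) → Bool := fun p => pvAM p.2 && pvA3 p.2 && pvA2 p.2 && pvA1 p.2 with hc1A
  set c2A : (String × List String) → Bool := fun p => pvAM p.2 && pvA3 p.2 && pvA2 p.2 with hc2A
  set c3A : (String × List String) → Bool := fun p => pvAM p.2 && pvA3 p.2 with hc3A
  set cB1 : (String × List String) → Bool := fun p => pvAM p.2 && pvB1 p.2 with hcB1
  set cB2 : (String × List String) → Bool := fun p => pvAM p.2 && !pvB1 p.2 && pvB2 p.2 with hcB2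
  set cB3 : (String × List String) → Bool := fun p => pvAM p.2 && !pvB1 p.2 && !pvB2 p.2 && pvB3 p.2 with hcB3
  have hA' : List.foldl (pvStepA (PySem.Dict.mk l))
      (PySem.Set.empty, PySem.Dict.empty, PySem.Dict.empty, PySem.Dict.empty) (List.map Prod.fst l)
      = (List.map Prod.fst (List.filter (fun p => pvAM p.2) l),
         PySem.Dict.mk (List.map pvRow (List.filter c3A l)),
         PySem.Dict.mk (List.map pvRow (List.filter c2A l)),
         PySem.Dict.mk (List.map pvRow (List.filter c1A l))) := hA
  have hB' : List.foldl pvStepB (PySem.Set.empty, [], [], []) l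
      = (List.map Prod.fst (List.filter (fun p => pvAM p.2) l),
         List.map pvRow (List.filter cB1 l),
         List.map pvRow (List.filter cB2 l),
         List.map pvRow (List.filter cB3 l)) := hB
  have hKB1 : List.map (fun (x : String × List String) => x.1) (List.map pvRow (List.filter cB1 l))
      = List.map Prod.fst (List.filter cB1 l) := by
    simp [pvRow, List.map_map, Function.comp_def]
  have hKB2 : List.map (fun (x : String × List String) => x.1) (List.map pvRow (List.filter cB2 l))
      = List.map Prod.fst (List.filter cB2 l) := by
    simp [pvRow, List.map_map, Function.comp_def]
  -- the pruned d2 is B's second bucket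
  have hd2 : List.filter (fun p => !(List.map (fun x => x.1) (List.map pvRow (List.filter cB1 l))).contains p.1)
        (List.map pvRow (List.filter c2A l))
      = List.map pvRow (List.filter cB2 l) := by
    rw [hKB1, List.filter_map, List.filter_filter]
    congr 1
    apply List.filter_congr
    intro p hp
    rw [show ((fun p => !((List.filter cB1 l).map Prod.fst).contains p.1) ∘ pvRow) p
          = !((List.filter cB1 l).map Prod.fst).contains p.1 from rfl,
        pvMemFilterKeys l hnd cB1 p hp]
    rw [hc1A] at *
    rw [hc2A, hcB1, hcB2]
    simp only [pvA1_eq, pvA2_eq, pvA3_eq, pvB1_eq, pvB2_eq, pvB3_eq]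
    by_cases h1 : pvC1 p.2
    · have h2 := pvC1_imp_C2 p.2 h1
      have h3 := pvC2_imp_C3 p.2 h2
      simp [h1, h2, h3]
    · by_cases h2 : pvC2 p.2
      · have h3 := pvC2_imp_C3 p.2 h2
        simp [h1, h2, h3]
      · by_cases h3 : pvC3 p.2 <;> simp [h1, h2, h3]
  -- the twice-pruned d3 is B's third bucket
  have hd3 : List.filter (fun p => !(List.map (fun x => x.1) (List.map pvRow (List.filter cB2 l))).contains p.1)
        (List.filter (fun p => !(List.map (fun x => x.1) (List.map pvRow (List.filter cB1 l))).contains p.1)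
          (List.map pvRow (List.filter c3A l)))
      = List.map pvRow (List.filter cB3 l) := by
    rw [hKB1, hKB2, List.filter_map, List.filter_map, List.filter_filter, List.filter_filter]
    congr 1
    apply List.filter_congr
    intro p hp
    rw [show ((fun p => !((List.filter cB1 l).map Prod.fst).contains p.1) ∘ pvRow) p
          = !((List.filter cB1 l).map Prod.fst).contains p.1 from rfl,
        show ((fun p => !((List.filter cB2 l).map Prod.fst).contains p.1) ∘ pvRow) p
          = !((List.filter cB2 l).map Prod.fst).contains p.1 from rfl,
        pvMemFilterKeys l hnd cB1 p hp, pvMemFilterKeys l hnd cB2 p hp]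
    rw [hc3A, hcB1, hcB2, hcB3]
    simp only [pvA1_eq, pvA2_eq, pvA3_eq, pvB1_eq, pvB2_eq, pvB3_eq]
    by_cases h1 : pvC1 p.2
    · have h2 := pvC1_imp_C2 p.2 h1
      have h3 := pvC2_imp_C3 p.2 h2
      simp [h1, h2, h3]
    · by_cases h2 : pvC2 p.2
      · have h3 := pvC2_imp_C3 p.2 h2
        simp [h1, h2, h3]
      · by_cases h3 : pvC3 p.2 <;> simp [h1, h2, h3]
  -- the first bucket needs no pruning
  have hd1 : List.filter c1A l = List.filter cB1 l := by
    apply List.filter_congr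
    intro p _
    rw [hc1A, hcB1]
    simp only [pvA1_eq, pvA2_eq, pvA3_eq, pvB1_eq]
    by_cases h1 : pvC1 p.2
    · have h2 := pvC1_imp_C2 p.2 h1
      have h3 := pvC2_imp_C3 p.2 h2
      simp [h1, h2, h3]
    · simp [h1]
  unfold validate_rxn_to_ec validate_rxn_to_ec_alt
  simp only [hkeys, hA', hB', pvEraseFoldPair, PySem.Dict.keys_mk, pvEraseFold, hd1]
  rw [hd2, hd3]
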